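-- pv_equiv track=rewrite | github.com/rikulauttia/data-structures-algorithms | week_02/listrounds.py | find_rounds
-- ===== SOURCE A (Python) =====
-- def find_rounds(numbers):
--     remaining = numbers.copy()
--
--     rounds = []
--
--     while remaining:
--         current_round = []
--
--         i = 0
--         next_number = min(remaining)
--
--         while i < len(remaining):
--             if remaining[i] == next_number:
--                 current_round.append(next_number)
--                 remaining.pop(i)
--                 next_number += 1
--             else:
--                 i += 1
--
--         rounds.append(current_round)
--
--     return rounds
-- ===== SOURCE B (Python) =====
-- def find_rounds(numbers):
--     # Single left-to-right sweep maintaining all open rounds ("chains") at once: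
--     # each element extends the first round (in round order) expecting it, or
--     # opens a new round kept sorted by its starting value.
--     chains = []
--     for x in numbers:
--         for k, c in enumerate(chains):
--             if c[-1] + 1 == x:
--                 c.append(x)
--                 break
--             if x < c[0]:
--                 chains.insert(k, [x])
--                 break
--         else:
--             chains.append([x])
--     return chains
-- ===== Notes on version B (the rewrite author's own statement) =====
-- stated objective: alternative
-- what changed: A repeatedly re-scans and mutates the remaining list (one full pass plus a min() per round); B makes a single left-to-right sweep over the input, maintaining all open rounds at once as a list of chains ordered by starting value, extending the first chain expecting the element or inserting a new chain.
import Mathlib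
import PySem

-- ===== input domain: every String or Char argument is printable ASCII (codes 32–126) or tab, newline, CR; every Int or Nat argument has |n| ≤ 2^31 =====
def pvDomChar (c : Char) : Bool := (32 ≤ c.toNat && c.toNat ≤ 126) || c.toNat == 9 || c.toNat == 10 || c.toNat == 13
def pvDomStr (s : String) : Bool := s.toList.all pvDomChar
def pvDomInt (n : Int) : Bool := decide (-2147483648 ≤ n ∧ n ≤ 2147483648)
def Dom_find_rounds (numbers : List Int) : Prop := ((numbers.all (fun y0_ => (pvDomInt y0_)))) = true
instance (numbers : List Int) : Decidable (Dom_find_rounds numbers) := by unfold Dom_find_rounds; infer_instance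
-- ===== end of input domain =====

-- B replaces A's round-by-round re-scanning of a mutated copy by one left-to-right sweep
-- that keeps all open rounds at once (objective: alternative; A copies its argument, so
-- neither version mutates the caller's list).

-- ===== PORT A =====
-- inner `while i < len(remaining)` loop of A; `remaining.pop(i)` with i in range is
-- `remaining.eraseIdx i` (PySem.List.pop?_natCast); i starts at 0 and only grows, so it
-- stays a Nat and `remaining[i]` is Python's in-range indexing. `fuel` is only a
-- totality guard (each step pops an element or advances i, so `len(remaining) + 1`
-- steps always suffice); it changes no computed value.
def find_rounds_pass (fuel : Nat) (remaining : List Int) (i : Nat) (cur : List Int)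
    (nxt : Int) : List Int × List Int :=
  match fuel with
  | 0 => (cur, remaining)
  | fuel + 1 =>
      if h : i < remaining.length then
        if remaining[i] = nxt then
          find_rounds_pass fuel (remaining.eraseIdx i) i (cur ++ [nxt]) (nxt + 1)
        else
          find_rounds_pass fuel remaining (i + 1) cur nxt
      else (cur, remaining)

-- outer `while remaining:` loop of A; `min(remaining)` is PySem.List.min?, which is
-- `some` exactly while the loop guard is true (none = empty list = loop exit).
-- `fuel` is again only a totality guard: every round removes at least the minimum,
-- so `len(numbers) + 1` iterations always suffice.
def find_rounds_outer (fuel : Nat) (remaining : List Int) (rounds : List (List Int)) :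
    List (List Int) :=
  match fuel with
  | 0 => rounds
  | fuel + 1 =>
      match PySem.List.min? remaining (fun y => y) with
      | none => rounds
      | some nxt =>
          find_rounds_outer fuel
            (find_rounds_pass (remaining.length + 1) remaining 0 [] nxt).2
            (rounds ++ [(find_rounds_pass (remaining.length + 1) remaining 0 [] nxt).1])

def find_rounds (numbers : List Int) : List (List Int) :=
  find_rounds_outer (numbers.length + 1) numbers []

-- ===== PORT B =====
-- inner `for k, c in enumerate(chains)` loop of B with its two `break`s and the for-else;
-- chains are nonempty by construction, so c[-1] / c[0] are the getD reads below.
def find_rounds_insert (x : Int) : List (List Int) → List (List Int)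
  | [] => [[x]]
  | c :: cs =>
      if c.getLast?.getD 0 + 1 = x then (c ++ [x]) :: cs
      else if x < c.head?.getD 0 then [x] :: c :: cs
      else c :: find_rounds_insert x cs

def find_rounds_alt (numbers : List Int) : List (List Int) :=
  numbers.foldl (fun chains x => find_rounds_insert x chains) []

-- ===== PRECONDITION & SPEC =====
def Spec_find_rounds (numbers : List Int) (out : List (List Int)) : Prop := out = find_rounds_alt numbers
instance (numbers : List Int) (out : List (List Int)) : Decidable (Spec_find_rounds numbers out) := by unfold Spec_find_rounds; infer_instance

-- ===== CLAIM (what is proved, stated in full; the proofs are below) =====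
def Claim_equal_find_rounds : Prop := ∀ (numbers : List Int), Dom_find_rounds numbers → Spec_find_rounds numbers (find_rounds numbers)

-- ===== LEMMAS AND PROOFS =====

-- functional form of one pass of A: (collected round, surviving elements)
def passF (nxt : Int) : List Int → List Int × List Int
  | [] => ([], [])
  | x :: xs =>
      if x = nxt then
        let p := passF (nxt + 1) xs
        (nxt :: p.1, p.2)
      else
        let p := passF nxt xs
        (p.1, x :: p.2)

lemma passF_len (xs : List Int) : ∀ nxt, (passF nxt xs).1.length + (passF nxt xs).2.length = xs.length := by
  induction xs with
  | nil => intro nxt; simp [passF]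
  | cons x xs ih =>
      intro nxt
      by_cases h : x = nxt
      · simp only [passF, if_pos h]; have := ih (nxt + 1); simpa using by omega
      · simp only [passF, if_neg h]; have := ih nxt; simpa using by omega

lemma passF_fst_ne_nil (xs : List Int) : ∀ nxt, nxt ∈ xs → (passF nxt xs).1 ≠ [] := by
  induction xs with
  | nil => intro nxt h; simp at h
  | cons x xs ih =>
      intro nxt hmem
      by_cases h : x = nxt
      · simp [passF, h]
      · have hx : nxt ∈ xs := by
          rcases List.mem_cons.mp hmem with h1 | h1
          · exact absurd h1.symm h
          · exact h1
        simpa [passF, h] using ih nxt hx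

lemma passF_snd_lt (xs : List Int) (nxt : Int) (h : nxt ∈ xs) :
    (passF nxt xs).2.length < xs.length := by
  have h1 := passF_len xs nxt
  have h2 := List.length_pos_iff.mpr (passF_fst_ne_nil xs nxt h)
  omega

-- the sequence of rounds A produces, in functional form
def mpF (rem : List Int) : List (List Int) :=
  if _hne : rem = [] then []
  else
    let m := (PySem.List.min? rem (fun y => y)).getD 0
    (passF m rem).1 :: mpF (passF m rem).2
termination_by rem.length
decreasing_by
  rcases hm : PySem.List.min? rem (fun y => y) with _ | m
  · exact absurd ((PySem.List.min?_eq_none_iff rem (fun y => y)).mp hm) _hne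
  · simp only [Option.getD_some]
    exact passF_snd_lt rem m (PySem.List.min?_mem hm)

lemma mpF_nil : mpF [] = [] := by rw [mpF]; simp

lemma mpF_cons (rem : List Int) (m : Int)
    (hm : PySem.List.min? rem (fun y => y) = some m) :
    mpF rem = (passF m rem).1 :: mpF (passF m rem).2 := by
  have hne : rem ≠ [] := fun h => by simp [h, PySem.List.min?] at hm
  rw [mpF, dif_neg hne]
  simp [hm]

-- A's imperative pass equals passF on the unscanned suffix (fuel is adequate)
lemma find_rounds_pass_eq : ∀ (fuel : Nat) (rem : List Int) (i : Nat) (cur : List Int) (nxt : Int),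
    rem.length - i < fuel →
    find_rounds_pass fuel rem i cur nxt =
      (cur ++ (passF nxt (rem.drop i)).1, rem.take i ++ (passF nxt (rem.drop i)).2) := by
  intro fuel
  induction fuel with
  | zero => intro rem i cur nxt h; omega
  | succ fuel ih =>
      intro rem i cur nxt h
      rw [find_rounds_pass]
      split_ifs with h1 h2
      · have hlen := List.length_eraseIdx_of_lt h1
        rw [ih (rem.eraseIdx i) i (cur ++ [nxt]) (nxt + 1) (by omega)]
        have hd1 : (rem.eraseIdx i).drop i = rem.drop (i + 1) := by
          rw [List.eraseIdx_eq_take_drop_succ]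
          exact List.drop_left' (by simp; omega)
        have ht1 : (rem.eraseIdx i).take i = rem.take i := by
          rw [List.eraseIdx_eq_take_drop_succ]
          exact List.take_left' (by simp; omega)
        rw [hd1, ht1, List.drop_eq_getElem_cons h1]
        simp [passF, h2]
      · rw [ih rem (i + 1) cur nxt (by omega)]
        have htake : rem.take (i + 1) = rem.take i ++ [rem[i]] := by
          rw [List.take_add_one]
          simp [List.getElem?_eq_getElem h1]
        rw [List.drop_eq_getElem_cons h1]
        simp only [passF, if_neg h2]
        rw [htake, List.append_assoc, List.singleton_append]
      · rw [List.drop_eq_nil_of_le (by omega), List.take_of_length_le (by omega)]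
        simp [passF]

lemma find_rounds_outer_eq : ∀ (fuel : Nat) (rem : List Int) (rounds : List (List Int)),
    rem.length < fuel → find_rounds_outer fuel rem rounds = rounds ++ mpF rem := by
  intro fuel
  induction fuel with
  | zero => intro rem rounds h; omega
  | succ fuel ih =>
      intro rem rounds h
      rw [find_rounds_outer]
      rcases hm : PySem.List.min? rem (fun y => y) with _ | m
      · have : rem = [] := (PySem.List.min?_eq_none_iff rem (fun y => y)).mp hm
        subst this
        rw [mpF_nil]
        simp
      · have hmem : m ∈ rem := PySem.List.min?_mem hm
        change find_rounds_outer fuel (find_rounds_pass (rem.length + 1) rem 0 [] m).2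
          (rounds ++ [(find_rounds_pass (rem.length + 1) rem 0 [] m).1]) = rounds ++ mpF rem
        have hpass := find_rounds_pass_eq (rem.length + 1) rem 0 [] m (by omega)
        simp only [List.drop_zero, List.take_zero, List.nil_append] at hpass
        have hpass1 : (find_rounds_pass (rem.length + 1) rem 0 [] m).1 = (passF m rem).1 := by
          rw [hpass]
        have hpass2 : (find_rounds_pass (rem.length + 1) rem 0 [] m).2 = (passF m rem).2 := by
          rw [hpass]
        rw [hpass1, hpass2, ih _ _ (by have := passF_snd_lt rem m hmem; omega)]
        rw [mpF_cons rem m hm]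
        simp

-- one-pass append lemma: appending y to the scanned list extends the round iff the
-- pass's running next_number has reached exactly y
lemma passF_append (xs : List Int) : ∀ (nxt y : Int),
    passF nxt (xs ++ [y]) =
      if y = nxt + (passF nxt xs).1.length then
        ((passF nxt xs).1 ++ [y], (passF nxt xs).2)
      else
        ((passF nxt xs).1, (passF nxt xs).2 ++ [y]) := by
  induction xs with
  | nil =>
      intro nxt y
      by_cases h : y = nxt <;> simp [passF, h]
  | cons x xs ih =>
      intro nxt y
      by_cases h : x = nxt
      · simp only [List.cons_append, passF, if_pos h]
        rw [ih (nxt + 1) y]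
        by_cases hy : y = (nxt + 1) + ((passF (nxt + 1) xs).1.length : Int)
        · rw [if_pos hy, if_pos (by simp; omega)]
        · rw [if_neg hy, if_neg (by simp; omega)]
      · simp only [List.cons_append, passF, if_neg h]
        rw [ih nxt y]
        by_cases hy : y = nxt + ((passF nxt xs).1.length : Int)
        · rw [if_pos hy, if_pos hy]
        · rw [if_neg hy, if_neg hy]

lemma passF_fst_head (xs : List Int) : ∀ nxt, (passF nxt xs).1 ≠ [] → (passF nxt xs).1.head? = some nxt := by
  induction xs with
  | nil => intro nxt h; simp [passF] at h
  | cons x xs ih =>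
      intro nxt h
      by_cases hx : x = nxt
      · simp [passF, hx]
      · simp only [passF, if_neg hx] at h ⊢
        exact ih nxt h

lemma passF_fst_getLast (xs : List Int) : ∀ nxt, (passF nxt xs).1 ≠ [] →
    (passF nxt xs).1.getLast? = some (nxt + (passF nxt xs).1.length - 1) := by
  induction xs with
  | nil => intro nxt h; simp [passF] at h
  | cons x xs ih =>
      intro nxt h
      by_cases hx : x = nxt
      · simp only [passF, if_pos hx] at h ⊢
        cases h2 : (passF (nxt + 1) xs).1 with
        | nil => simp
        | cons b t =>
            have hne : (passF (nxt + 1) xs).1 ≠ [] := by rw [h2]; simp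
            have := ih (nxt + 1) hne
            rw [h2] at this
            rw [show (nxt :: (b :: t)).getLast? = (b :: t).getLast? from by
              simp [List.getLast?_cons]]
            rw [this]
            simp
            omega
      · simp only [passF, if_neg hx] at h ⊢
        exact ih nxt h

lemma passF_none (xs : List Int) : ∀ nxt, (∀ y ∈ xs, nxt < y) → passF nxt xs = ([], xs) := by
  induction xs with
  | nil => intro nxt _; simp [passF]
  | cons x xs ih =>
      intro nxt h
      have hx : x ≠ nxt := by have := h x (by simp); omega
      simp [passF, hx, ih nxt (fun y hy => h y (by simp [hy]))]

lemma min?_append_singleton (xs : List Int) (x m : Int)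
    (h : PySem.List.min? xs (fun y => y) = some m) :
    PySem.List.min? (xs ++ [x]) (fun y => y) = some (min m x) := by
  cases xs with
  | nil => simp [PySem.List.min?] at h
  | cons z t =>
      rw [PySem.List.min?_id_cons] at h
      rw [List.cons_append, PySem.List.min?_id_cons]
      simp only [List.foldl_append, List.foldl_cons, List.foldl_nil]
      rw [Option.some_inj.mp h]

-- the key simulation step: appending one element to the input inserts it into the
-- round structure exactly the way B's sweep does
lemma mpF_append : ∀ (n : Nat) (xs : List Int) (x : Int), xs.length ≤ n →
    mpF (xs ++ [x]) = find_rounds_insert x (mpF xs) := by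
  intro n
  induction n with
  | zero =>
      intro xs x h
      have hxs : xs = [] := List.eq_nil_of_length_eq_zero (by omega)
      subst hxs
      rw [List.nil_append, mpF_nil]
      rw [mpF_cons [x] x (by rw [PySem.List.min?_id_cons]; simp)]
      simp [passF, mpF_nil, find_rounds_insert]
  | succ n ih =>
      intro xs x hlen
      rcases hm : PySem.List.min? xs (fun y => y) with _ | m
      · have hxs : xs = [] := (PySem.List.min?_eq_none_iff xs (fun y => y)).mp hm
        subst hxs
        rw [List.nil_append, mpF_nil]
        rw [mpF_cons [x] x (by rw [PySem.List.min?_id_cons]; simp)]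
        simp [passF, mpF_nil, find_rounds_insert]
      · have hmem : m ∈ xs := PySem.List.min?_mem hm
        have hbound : ∀ y ∈ xs, m ≤ y := by
          intro y hy; simpa using PySem.List.min?_isMin hm y hy
        have hr : (passF m xs).1 ≠ [] := passF_fst_ne_nil xs m hmem
        have hrlen : 0 < (passF m xs).1.length := List.length_pos_iff.mpr hr
        have hlast : (passF m xs).1.getLast? = some (m + (passF m xs).1.length - 1) :=
          passF_fst_getLast xs m hr
        have hhead : (passF m xs).1.head? = some m := passF_fst_head xs m hr
        have hmpxs : mpF xs = (passF m xs).1 :: mpF (passF m xs).2 := mpF_cons xs m hm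
        by_cases hx : x < m
        · -- x opens a new earliest round [x] in front
          have hminapp : PySem.List.min? (xs ++ [x]) (fun y => y) = some x := by
            rw [min?_append_singleton xs x m hm, min_eq_right (le_of_lt hx)]
          have hnone : passF x xs = ([], xs) :=
            passF_none xs x (fun y hy => lt_of_lt_of_le hx (hbound y hy))
          have hpass : passF x (xs ++ [x]) = ([x], xs) := by
            rw [passF_append xs x x, hnone]
            simp
          have hp1 : (passF x (xs ++ [x])).1 = [x] := by rw [hpass]
          have hp2 : (passF x (xs ++ [x])).2 = xs := by rw [hpass]
          rw [mpF_cons (xs ++ [x]) x hminapp, hp1, hp2, hmpxs]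
          simp only [find_rounds_insert]
          rw [if_neg (by rw [hlast]; simp; omega),
              if_pos (by rw [hhead]; simpa using hx)]
        · -- min unchanged: x extends the first round or is inserted further down
          rw [not_lt] at hx
          have hminapp : PySem.List.min? (xs ++ [x]) (fun y => y) = some m := by
            rw [min?_append_singleton xs x m hm, min_eq_left hx]
          by_cases he : x = m + ((passF m xs).1.length : Int)
          · have hp1 : (passF m (xs ++ [x])).1 = (passF m xs).1 ++ [x] := by
              rw [passF_append xs m x, if_pos he]
            have hp2 : (passF m (xs ++ [x])).2 = (passF m xs).2 := by
              rw [passF_append xs m x, if_pos he]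
            rw [mpF_cons (xs ++ [x]) m hminapp, hp1, hp2, hmpxs]
            simp only [find_rounds_insert]
            rw [if_pos (by rw [hlast]; simp; omega)]
          · have hp1 : (passF m (xs ++ [x])).1 = (passF m xs).1 := by
              rw [passF_append xs m x, if_neg he]
            have hp2 : (passF m (xs ++ [x])).2 = (passF m xs).2 ++ [x] := by
              rw [passF_append xs m x, if_neg he]
            have hslen : (passF m xs).2.length < xs.length := passF_snd_lt xs m hmem
            rw [mpF_cons (xs ++ [x]) m hminapp, hp1, hp2,
                ih (passF m xs).2 x (by omega), hmpxs]
            simp only [find_rounds_insert]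
            rw [if_neg (by rw [hlast]; simp; omega),
                if_neg (by rw [hhead]; simpa using not_lt.mpr hx)]

lemma mpF_eq_alt (numbers : List Int) : mpF numbers = find_rounds_alt numbers := by
  induction numbers using List.reverseRecOn with
  | nil => simp [mpF_nil, find_rounds_alt]
  | append_singleton xs x ih =>
      rw [mpF_append xs.length xs x (le_refl _), ih]
      simp [find_rounds_alt, List.foldl_append]

-- ===== VERDICT (by name: the statement is the Claim_ definition above) =====
theorem find_rounds_spec : Claim_equal_find_rounds := by
  intro numbers _
  unfold Spec_find_rounds find_rounds
  rw [find_rounds_outer_eq (numbers.length + 1) numbers [] (by omega), mpF_eq_alt]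
  simp
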